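-- pv_equiv track=rewrite | github.com/CongruiDu/fisher_merging | merge_and_evaluate.py | intersect_shared_and_fisher_keys
-- ===== SOURCE A (Python) =====
-- def intersect_shared_and_fisher_keys(
--     shared_param_names,
--     fishers,
-- ):
--     fisher_key_sets = [set(f.keys()) for f in fishers]
--     common_fisher_keys = set(shared_param_names)
--     for ks in fisher_key_sets:
--         common_fisher_keys &= ks
--
--     ordered = [name for name in shared_param_names if name in common_fisher_keys]
--     return ordered
-- ===== SOURCE B (Python) =====
-- def intersect_shared_and_fisher_keys(
--     shared_param_names,
--     fishers,
-- ):
--     return [name for name in shared_param_names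
--             if all(name in f for f in fishers)]
-- ===== Notes on version B (the rewrite author's own statement) =====
-- stated objective: simpler
-- what changed: Replaced the key-set construction and running-intersection loop with a single comprehension that keeps each name iff it is a key of every fisher dict.
import Mathlib
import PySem

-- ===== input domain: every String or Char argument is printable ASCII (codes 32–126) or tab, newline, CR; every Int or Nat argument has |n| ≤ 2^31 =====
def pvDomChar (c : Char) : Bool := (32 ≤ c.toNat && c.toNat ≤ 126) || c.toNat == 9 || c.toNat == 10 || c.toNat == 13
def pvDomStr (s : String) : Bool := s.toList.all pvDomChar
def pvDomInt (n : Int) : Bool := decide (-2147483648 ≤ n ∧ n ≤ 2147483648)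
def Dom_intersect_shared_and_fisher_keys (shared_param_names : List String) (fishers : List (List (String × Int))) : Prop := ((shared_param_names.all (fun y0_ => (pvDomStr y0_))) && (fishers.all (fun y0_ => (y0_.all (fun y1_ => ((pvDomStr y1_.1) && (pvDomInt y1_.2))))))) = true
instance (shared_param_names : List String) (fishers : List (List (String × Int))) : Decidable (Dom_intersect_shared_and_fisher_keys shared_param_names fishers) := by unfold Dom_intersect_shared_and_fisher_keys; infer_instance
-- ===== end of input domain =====

-- B replaces A's key-set construction and running-intersection loop with a single filter that keeps a name iff it is a key of every fisher dict (objective: simpler).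
-- ===== PORT A =====
def intersect_shared_and_fisher_keys (shared_param_names : List String) (fishers : List (List (String × Int))) : List String :=
  let fisher_key_sets := fishers.map (fun f => PySem.Set.ofList (f.map Prod.fst))
  let common_fisher_keys := fisher_key_sets.foldl (fun s ks => PySem.Set.inter s ks) (PySem.Set.ofList shared_param_names)
  let ordered := shared_param_names.filter (fun name => PySem.Set.contains common_fisher_keys name)
  ordered

-- ===== PORT B =====
def intersect_shared_and_fisher_keys_alt (shared_param_names : List String) (fishers : List (List (String × Int))) : List String :=
  shared_param_names.filter (fun name => fishers.all (fun f => (f.map Prod.fst).contains name))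

-- ===== PRECONDITION & SPEC =====
def Spec_intersect_shared_and_fisher_keys (shared_param_names : List String) (fishers : List (List (String × Int))) (out : List String) : Prop := out = intersect_shared_and_fisher_keys_alt shared_param_names fishers
instance (shared_param_names : List String) (fishers : List (List (String × Int))) (out : List String) : Decidable (Spec_intersect_shared_and_fisher_keys shared_param_names fishers out) := by unfold Spec_intersect_shared_and_fisher_keys; infer_instance

-- ===== CLAIM (what is proved, stated in full; the proofs are below) =====
def Claim_equal_intersect_shared_and_fisher_keys : Prop := ∀ (shared_param_names : List String) (fishers : List (List (String × Int))), Dom_intersect_shared_and_fisher_keys shared_param_names fishers → Spec_intersect_shared_and_fisher_keys shared_param_names fishers (intersect_shared_and_fisher_keys shared_param_names fishers)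

-- ===== LEMMAS AND PROOFS =====

-- ===== VERDICT (by name: the statement is the Claim_ definition above) =====
-- membership in a left fold of set intersections
theorem pv_mem_foldl_inter (l : List (PySem.Set String)) (s : PySem.Set String) (x : String) :
    x ∈ l.foldl (fun s ks => PySem.Set.inter s ks) s ↔ x ∈ s ∧ ∀ ks ∈ l, x ∈ ks := by
  induction l generalizing s with
  | nil => simp
  | cons ks l ih =>
    simp [List.foldl_cons, ih, PySem.Set.mem_inter]
    tauto

theorem intersect_shared_and_fisher_keys_spec : Claim_equal_intersect_shared_and_fisher_keys := by
  intro shared fishers _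
  unfold Spec_intersect_shared_and_fisher_keys intersect_shared_and_fisher_keys intersect_shared_and_fisher_keys_alt
  apply List.filter_congr
  intro name hname
  rw [Bool.eq_iff_iff, PySem.Set.contains_iff, pv_mem_foldl_inter]
  simp only [PySem.Set.mem_ofList, List.all_eq_true, List.mem_map, List.contains_iff_mem,
    forall_exists_index, and_imp, forall_apply_eq_imp_iff₂, hname, true_and]
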